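-- pv_equiv track=rewrite | github.com/kmcginn/advent-of-code | 2016/day04/security.py | isRealRoom
-- ===== SOURCE A (Python) =====
-- from collections import defaultdict
-- from operator import itemgetter
--
-- def isRealRoom(name, checksum):
--     if len(checksum) != 5:
--         raise Exception
--     totals = defaultdict(int)
--     for c in name:
--         if c != '-':
--             totals[c] += 1
--     pairs = zip(totals.keys(), totals.values())
--     alphaPairs = sorted(pairs, key=itemgetter(0))
--     freqPairs = sorted(alphaPairs, key=itemgetter(1), reverse=True)
--     genCheckSum = ''
--     for a, b in freqPairs:
--         genCheckSum += a
--     return genCheckSum[:5] == checksum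
-- ===== SOURCE B (Python) =====
-- def isRealRoom(name, checksum):
--     if len(checksum) != 5:
--         raise Exception
--     counts = {}
--     for c in name:
--         if c != '-':
--             counts[c] = counts.get(c, 0) + 1
--     gen = []
--     for _ in range(5):
--         if not counts:
--             break
--         best = min(counts, key=lambda ch: (-counts[ch], ch))
--         gen.append(best)
--         del counts[best]
--     return ''.join(gen) == checksum
-- ===== Notes on version B (the rewrite author's own statement) =====
-- stated objective: alternative
-- what changed: A sorts the whole letter-count table twice (alphabetically, then stably by count descending) and takes the first five letters; B never sorts: it runs up to five rounds of selection, each scanning the remaining counts for the highest-count letter with alphabetical tie-break and deleting it.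
import Mathlib
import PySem

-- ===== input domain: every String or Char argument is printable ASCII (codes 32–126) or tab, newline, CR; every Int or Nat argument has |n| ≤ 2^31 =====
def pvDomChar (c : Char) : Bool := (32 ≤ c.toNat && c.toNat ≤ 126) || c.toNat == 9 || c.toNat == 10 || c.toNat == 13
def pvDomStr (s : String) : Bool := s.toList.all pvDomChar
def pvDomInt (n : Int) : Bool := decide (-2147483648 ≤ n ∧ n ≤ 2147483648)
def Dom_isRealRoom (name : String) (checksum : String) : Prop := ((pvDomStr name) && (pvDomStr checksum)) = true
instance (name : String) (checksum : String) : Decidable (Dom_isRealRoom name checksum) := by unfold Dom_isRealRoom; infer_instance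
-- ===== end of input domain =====

-- B replaces A's two stable sorts of the whole letter-count table by repeated best-letter
-- selection (scan remaining counts up to 5 times, pick highest count with alphabetical
-- tie-break, delete it) — objective: alternative algorithm, same cost class.

-- ===== PORT A =====
def isRealRoom (name : String) (checksum : String) : Bool :=
  if PySem.Str.len checksum ≠ 5 then false  -- Python A raises Exception here; excluded by Pre_isRealRoom
  else
    let totals := name.toList.foldl
      (fun d c => if c ≠ '-' then d.modify c 0 (· + 1) else d) (PySem.Dict.empty : PySem.Dict Char Int)
    let pairs := List.zip totals.keys totals.values
    let alphaPairs := PySem.List.sorted pairs (fun p => p.1) false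
    let freqPairs := PySem.List.sorted alphaPairs (fun p => p.2) true
    let genCheckSum := freqPairs.foldl (fun s p => s ++ [p.1]) ([] : List Char)
    decide (PySem.List.slice genCheckSum none (some 5) = checksum.toList)

-- ===== PORT B =====
-- the selection loop: up to n rounds, each picking min over (-count, letter) and deleting it;
-- Python's 'if not counts: break' is the 'none' branch (min2? is none exactly on the empty dict)
def pickLoop : Nat → PySem.Dict Char Int → List Char → List Char
  | 0, _, gen => gen
  | n + 1, d, gen =>
    match PySem.List.min2? d.keys (fun ch => -(d.getD ch 0)) (fun ch => ch) with
    | none => gen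
    | some best => pickLoop n (d.erase best) (gen ++ [best])

def isRealRoom_alt (name : String) (checksum : String) : Bool :=
  if PySem.Str.len checksum ≠ 5 then false  -- Python B raises Exception here; excluded by Pre_isRealRoom
  else
  let counts := name.toList.foldl
    (fun d c => if c ≠ '-' then d.modify c 0 (· + 1) else d) (PySem.Dict.empty : PySem.Dict Char Int)
  decide (pickLoop 5 counts [] = checksum.toList)

-- ===== PRECONDITION & SPEC =====
-- Pre_ excludes exactly the inputs where A raises its explicit Exception: len(checksum) != 5.
def Pre_isRealRoom (name : String) (checksum : String) : Prop := PySem.Str.len checksum = 5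
instance (name : String) (checksum : String) : Decidable (Pre_isRealRoom name checksum) := by
  unfold Pre_isRealRoom; infer_instance
def pvWitness_isRealRoom : String × String := ("aabbc-ddd", "dabcz")

def Spec_isRealRoom (name : String) (checksum : String) (out : Bool) : Prop := out = isRealRoom_alt name checksum
instance (name : String) (checksum : String) (out : Bool) : Decidable (Spec_isRealRoom name checksum out) := by unfold Spec_isRealRoom; infer_instance

-- ===== CLAIM (what is proved, stated in full; the proofs are below) =====
def Claim_equal_isRealRoom : Prop := ∀ (name : String) (checksum : String), Dom_isRealRoom name checksum → Pre_isRealRoom name checksum → Spec_isRealRoom name checksum (isRealRoom name checksum)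

-- ===== LEMMAS AND PROOFS =====

-- the strict order in which A's double stable sort lists the (letter, count) pairs:
-- count descending, then letter ascending
def pvR (a b : Char × Int) : Prop := b.2 < a.2 ∨ (a.2 = b.2 ∧ a.1 < b.1)

-- the same order read off the count table, on letters (B's min-key)
def pvLt2 (d : PySem.Dict Char Int) (x y : Char) : Prop :=
  -(d.getD x 0) < -(d.getD y 0) ∨ (-(d.getD x 0) = -(d.getD y 0) ∧ x < y)

theorem insertBy_pairwise_pvR (x : Char × Int) :
    ∀ (ys : List (Char × Int)), ys.Pairwise pvR → (∀ y ∈ ys, y.1 < x.1) →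
    (PySem.List.insertBy (fun a b => decide (b.2 < a.2)) x ys).Pairwise pvR := by
  intro ys
  induction ys with
  | nil => intro _ _; simp [PySem.List.insertBy, pvR]
  | cons y t ih =>
    intro hp hlt
    rw [List.pairwise_cons] at hp
    simp only [PySem.List.insertBy]
    split_ifs with h
    · -- x :: y :: t, with y.2 < x.2
      simp only [decide_eq_true_eq] at h
      refine List.Pairwise.cons ?_ (List.Pairwise.cons hp.1 hp.2)
      intro z hz
      rcases List.mem_cons.mp hz with rfl | hz
      · exact Or.inl h
      · have := hp.1 z hz
        left
        rcases this with h' | ⟨h', _⟩ <;> omega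
    · -- y :: insertBy x t
      simp only [decide_eq_true_eq, not_lt] at h
      refine List.Pairwise.cons ?_ (ih hp.2 (fun z hz => hlt z (List.mem_cons_of_mem _ hz)))
      intro z hz
      rw [PySem.List.mem_insertBy] at hz
      rcases hz with rfl | hz
      · -- pvR y x : x.2 ≤ y.2 and y.1 < x.1
        rcases lt_or_eq_of_le h with h' | h'
        · exact Or.inl h'
        · exact Or.inr ⟨h'.symm, hlt y (List.mem_cons_self)⟩
      · exact hp.1 z hz

theorem foldl_insertBy_pairwise_pvR :
    ∀ (L acc : List (Char × Int)), L.Pairwise (fun a b => a.1 < b.1) → acc.Pairwise pvR →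
    (∀ y ∈ acc, ∀ z ∈ L, y.1 < z.1) →
    (L.foldl (fun acc x => PySem.List.insertBy (fun a b => decide (b.2 < a.2)) x acc) acc).Pairwise pvR := by
  intro L
  induction L with
  | nil => intro acc _ h _; simpa using h
  | cons x t ih =>
    intro acc hL hacc hsep
    rw [List.pairwise_cons] at hL
    simp only [List.foldl_cons]
    apply ih _ hL.2
    · exact insertBy_pairwise_pvR x acc hacc (fun y hy => hsep y hy x List.mem_cons_self)
    · intro y hy z hz
      rcases (PySem.List.mem_insertBy _ _ _ _).mp hy with rfl | hy
      · exact hL.1 z hz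
      · exact hsep y hy z (List.mem_cons_of_mem _ hz)

def pvStep (d : PySem.Dict Char Int) (acc : Option Char) (x : Char) : Option Char :=
  match acc with
  | none => some x
  | some n =>
    if (decide (-(d.getD x 0) < -(d.getD n 0)) || !decide (-(d.getD n 0) < -(d.getD x 0)) && decide (x < n)) = true
    then some x else some n

theorem min2?_eq_foldl_pvStep (d : PySem.Dict Char Int) (xs : List Char) :
    PySem.List.min2? xs (fun ch => -(d.getD ch 0)) (fun ch => ch) = xs.foldl (pvStep d) none := by
  unfold PySem.List.min2?
  congr 1
  funext acc x
  cases acc <;> rfl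

theorem min2?_foldl_keep (d : PySem.Dict Char Int) (m : Char) :
    ∀ (xs : List Char), (∀ y ∈ xs, y = m ∨ pvLt2 d m y) →
    List.foldl (pvStep d) (some m) xs = some m := by
  intro xs
  induction xs with
  | nil => intro _; rfl
  | cons x t ih =>
    intro h
    have hx := h x List.mem_cons_self
    have step : pvStep d (some m) x = some m := by
      simp only [pvStep]
      rcases hx with rfl | hlt
      · simp
      · rcases hlt with h' | ⟨h', h''⟩
        · have : ¬ (-(d.getD x 0) < -(d.getD m 0)) := by omega
          simp [this, h']
        · have h1 : ¬ (-(d.getD x 0) < -(d.getD m 0)) := by omega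
          have h2 : ¬ (x < m) := not_lt_of_gt h''
          simp [h1, h2]
    simp only [List.foldl_cons, step]
    exact ih (fun y hy => h y (List.mem_cons_of_mem _ hy))

theorem min2?_unique (d : PySem.Dict Char Int) (m : Char) :
    ∀ (xs : List Char), m ∈ xs → (∀ y ∈ xs, y ≠ m → pvLt2 d m y) →
    PySem.List.min2? xs (fun ch => -(d.getD ch 0)) (fun ch => ch) = some m := by
  have main : ∀ (xs : List Char) (b : Char), pvLt2 d m b → m ∈ xs → (∀ y ∈ xs, y ≠ m → pvLt2 d m y) →
      List.foldl (pvStep d) (some b) xs = some m := by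
    intro xs
    induction xs with
    | nil => intro b _ hm _; cases hm
    | cons x t ih =>
      intro b hb hm hall
      simp only [List.foldl_cons]
      show List.foldl (pvStep d) (pvStep d (some b) x) t = some m
      by_cases hxm : x = m
      · subst hxm
        have step : pvStep d (some b) x = some x := by
          simp only [pvStep]
          rcases hb with h' | ⟨h', h''⟩
          · simp [h']
          · have h1 : ¬ (-(d.getD b 0) < -(d.getD x 0)) := by omega
            simp [h1, h'']
        rw [step]
        exact min2?_foldl_keep d x t (fun y hy => by
          by_cases hy' : y = x
          · exact Or.inl hy'
          · exact Or.inr (hall y (List.mem_cons_of_mem _ hy) hy'))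
      · have hm' : m ∈ t := by
          rcases List.mem_cons.mp hm with rfl | h
          · exact absurd rfl hxm
          · exact h
        have hx : pvLt2 d m x := hall x List.mem_cons_self hxm
        have hall' : ∀ y ∈ t, y ≠ m → pvLt2 d m y := fun y hy => hall y (List.mem_cons_of_mem _ hy)
        simp only [pvStep]
        split
        · exact ih x hx hm' hall'
        · exact ih b hb hm' hall'
  intro xs hm hall
  cases xs with
  | nil => cases hm
  | cons x t =>
    rw [min2?_eq_foldl_pvStep]
    simp only [List.foldl_cons]
    show List.foldl (pvStep d) (pvStep d none x) t = some m
    simp only [pvStep]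
    by_cases hxm : x = m
    · subst hxm
      exact min2?_foldl_keep d x t (fun y hy => by
        by_cases hy' : y = x
        · exact Or.inl hy'
        · exact Or.inr (hall y (List.mem_cons_of_mem _ hy) hy'))
    · have hm' : m ∈ t := by
        rcases List.mem_cons.mp hm with rfl | h
        · exact absurd rfl hxm
        · exact h
      exact main t x (hall x List.mem_cons_self hxm) hm'
        (fun y hy => hall y (List.mem_cons_of_mem _ hy))

theorem pickLoop_eq_take :
    ∀ (n : Nat) (ys : List (Char × Int)) (d : PySem.Dict Char Int) (gen : List Char),
    d.keys.Nodup → ys.Perm d.items → ys.Pairwise pvR →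
    pickLoop n d gen = gen ++ (ys.map (·.1)).take n := by
  intro n
  induction n with
  | zero => intro ys d gen _ _ _; simp [pickLoop]
  | succ n ih =>
    intro ys d gen hnd hperm hpw
    cases ys with
    | nil =>
      have hit : d.items = [] := hperm.symm.eq_nil
      have hk : d.keys = [] := by simp [PySem.Dict.keys, hit]
      simp [pickLoop, hk, PySem.List.min2?]
    | cons p t =>
      have hpmem : p ∈ d.items := hperm.mem_iff.mp List.mem_cons_self
      have hkeys : d.keys = d.items.map (·.1) := rfl
      have hys_nd : ((p :: t).map (·.1)).Nodup := by
        have hpm : ((p :: t).map (·.1)).Perm (d.items.map (·.1)) := hperm.map _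
        exact (hpm.nodup_iff).mpr (hkeys ▸ hnd)
      have hpnotin : p.1 ∉ t.map (·.1) := by
        rw [List.map_cons, List.nodup_cons] at hys_nd
        exact hys_nd.1
      have hgetD : ∀ q ∈ d.items, d.getD q.1 0 = q.2 := by
        intro q hq
        exact PySem.Dict.getD_of_mem_items d hq hnd 0
      rw [List.pairwise_cons] at hpw
      have hmin : PySem.List.min2? d.keys (fun ch => -(d.getD ch 0)) (fun ch => ch) = some p.1 := by
        apply min2?_unique
        · rw [hkeys]; exact List.mem_map_of_mem hpmem
        · intro y hy hne
          rw [hkeys] at hy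
          obtain ⟨q, hq, rfl⟩ := List.mem_map.mp hy
          have hqy : q ∈ p :: t := hperm.mem_iff.mpr hq
          have hqt : q ∈ t := by
            rcases List.mem_cons.mp hqy with rfl | h
            · exact absurd rfl hne
            · exact h
          have hR : pvR p q := hpw.1 q hqt
          simp only [pvLt2]
          rw [hgetD p hpmem, hgetD q hq]
          rcases hR with h | ⟨h, h'⟩
          · exact Or.inl (by omega)
          · exact Or.inr ⟨by omega, h'⟩
      have herase_items : (d.erase p.1).items = d.items.filter (fun q => !(q.1 == p.1)) := rfl
      have hndm : (d.items.map (fun x => x.1)).Nodup := hkeys ▸ hnd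
      have hnd' : (d.erase p.1).keys.Nodup := by
        have hsub : (d.erase p.1).items.Sublist d.items :=
          herase_items ▸ List.filter_sublist
        exact (hsub.map (fun x => x.1)).nodup hndm
      have hperm' : t.Perm (d.erase p.1).items := by
        rw [herase_items]
        have h1 : (d.items.filter (fun q => !(q.1 == p.1))).Perm
            ((p :: t).filter (fun q => !(q.1 == p.1))) := (hperm.symm.filter _)
        have h2 : (p :: t).filter (fun q => !(q.1 == p.1)) = t := by
          rw [List.filter_cons]
          simp only [beq_self_eq_true, Bool.not_true]
          rw [if_neg (by simp)]
          apply List.filter_eq_self.mpr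
          intro q hq
          simp only [Bool.not_eq_true', beq_eq_false_iff_ne, ne_eq]
          intro hqe
          exact hpnotin (hqe ▸ List.mem_map_of_mem hq)
        rw [h2] at h1
        exact h1.symm
      show pickLoop (n + 1) d gen = _
      rw [pickLoop, hmin]
      show pickLoop n (d.erase p.1) (gen ++ [p.1]) = _
      rw [ih t (d.erase p.1) (gen ++ [p.1]) hnd' hperm' hpw.2]
      simp

theorem pvMain (name checksum : String) (hpre : PySem.Str.len checksum = 5) :
    isRealRoom name checksum = isRealRoom_alt name checksum := by
  have hl : (checksum.length : Int) = 5 := by simpa [PySem.Str.len] using hpre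
  unfold isRealRoom isRealRoom_alt
  rw [if_neg (by simp [hl]), if_neg (by simp [hl])]
  set totals := name.toList.foldl
    (fun d c => if c ≠ '-' then d.modify c 0 (· + 1) else d) (PySem.Dict.empty : PySem.Dict Char Int)
    with htotals_def
  have htotals : totals = PySem.Dict.counter (name.toList.filter (fun c => decide (c ≠ '-'))) := by
    rw [PySem.Dict.counter_eq_foldl, List.foldl_filter, htotals_def]
    congr 1
    funext d c
    by_cases h : c = '-' <;> simp [h]
  have hnd : totals.keys.Nodup := by
    rw [htotals]; exact PySem.Dict.nodup_keys_counter _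
  have hzip : List.zip totals.keys totals.values = totals.items := by
    show List.zip (totals.items.map (fun x => x.1)) (totals.items.map (fun x => x.2)) = totals.items
    rw [List.zip_map']
    simp
  show (decide (PySem.List.slice
      ((PySem.List.sorted (PySem.List.sorted (List.zip totals.keys totals.values) (fun p => p.1) false)
        (fun p => p.2) true).foldl (fun s p => s ++ [p.1]) ([] : List Char)) none (some 5)
      = checksum.toList))
    = decide (pickLoop 5 totals [] = checksum.toList)
  rw [hzip]
  set alphaPairs := PySem.List.sorted totals.items (fun p => p.1) false with halpha_def
  have hperm1 : alphaPairs.Perm totals.items := PySem.List.sorted_perm _ _ _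
  have hnd1 : (alphaPairs.map (fun x => x.1)).Nodup :=
    ((hperm1.map _).nodup_iff).mpr hnd
  have hpw1 : alphaPairs.Pairwise (fun a b => a.1 < b.1) := by
    have hle : alphaPairs.Pairwise (fun a b => a.1 ≤ b.1) :=
      PySem.List.sorted_pairwise totals.items (fun p => p.1)
    have hne : alphaPairs.Pairwise (fun a b => a.1 ≠ b.1) := List.pairwise_map.mp hnd1
    exact (hle.and hne).imp (fun h => lt_of_le_of_ne h.1 h.2)
  set freqPairs := PySem.List.sorted alphaPairs (fun p => p.2) true with hfreq_def
  have hpw2 : freqPairs.Pairwise pvR := by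
    rw [hfreq_def, PySem.List.sorted_rev_eq_foldl_insertBy]
    exact foldl_insertBy_pairwise_pvR alphaPairs [] hpw1 List.Pairwise.nil (by simp)
  have hperm2 : freqPairs.Perm totals.items :=
    (PySem.List.sorted_perm _ _ _).trans hperm1
  have hgen : freqPairs.foldl (fun s p => s ++ [p.1]) ([] : List Char)
      = freqPairs.map (fun x => x.1) := by
    rw [PySem.List.foldl_append_singleton_eq_map]
    simp
  rw [hgen]
  rw [PySem.List.slice_to _ (by norm_num)]
  rw [pickLoop_eq_take 5 freqPairs totals [] hnd hperm2 hpw2]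
  simp

-- ===== VERDICT (by name: the statement is the Claim_ definition above) =====
theorem isRealRoom_spec : Claim_equal_isRealRoom := by
  intro name checksum _ hpre
  unfold Spec_isRealRoom
  exact pvMain name checksum hpre
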